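-- pv_equiv track=rewrite | github.com/amalieshi/advent_of_code2023 | day2/cube_conumdrum_func.py | max_rgb_for_a_game
-- ===== SOURCE A (Python) =====
-- def max_rgb_for_a_game(rgb_results):
--     """
--     getting the rbg value for a game and produce a list of the maximum number of cube from each color category
--     :param rgb_results: the list of all the sub-game results
--     :return:
--     """
--     red_max = rgb_results[0][0]
--     green_max = rgb_results[0][1]
--     blue_max = rgb_results[0][2]
--     for rgb in rgb_results:
--         red_max = max([red_max, rgb[0]])
--         green_max = max([green_max, rgb[1]])
--         blue_max = max([blue_max, rgb[2]])
--     return [red_max, green_max, blue_max]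
-- ===== SOURCE B (Python) =====
-- def max_rgb_for_a_game(rgb_results):
--     return [max(rgb[i] for rgb in rgb_results) for i in range(3)]
-- ===== Notes on version B (the rewrite author's own statement) =====
-- stated objective: idiomatic
-- what changed: Replaces the interleaved three-accumulator loop seeded from row 0 by three independent per-color scans, one max() per column index; Pre_ excludes only the empty list, on which both programs raise (A IndexError, B ValueError).
import Mathlib
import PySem

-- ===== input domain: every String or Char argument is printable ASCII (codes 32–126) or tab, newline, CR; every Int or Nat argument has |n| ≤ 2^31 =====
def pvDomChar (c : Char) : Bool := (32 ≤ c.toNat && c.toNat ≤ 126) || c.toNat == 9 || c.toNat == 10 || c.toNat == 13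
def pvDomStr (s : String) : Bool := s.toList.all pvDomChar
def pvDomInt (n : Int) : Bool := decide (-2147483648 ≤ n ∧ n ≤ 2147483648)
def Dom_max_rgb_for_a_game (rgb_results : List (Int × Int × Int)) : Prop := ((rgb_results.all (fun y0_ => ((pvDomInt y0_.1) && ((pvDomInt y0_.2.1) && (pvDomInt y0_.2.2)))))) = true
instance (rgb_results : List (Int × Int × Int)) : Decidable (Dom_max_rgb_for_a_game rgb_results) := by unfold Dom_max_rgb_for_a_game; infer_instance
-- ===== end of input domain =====

-- B computes each color column's maximum with its own scan instead of A's single interleaved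
-- three-accumulator loop seeded from row 0. Return value equivalence; no mutation in either.
-- ===== PORT A =====
-- one interleaved pass: three accumulators seeded from rgb_results[0], updated together
def max_rgb_for_a_game (rgb_results : List (Int × Int × Int)) : List Int :=
  match rgb_results with
  | [] => []  -- unreachable: Pre_ excludes [] (Python raises IndexError at rgb_results[0][0])
  | h :: _ =>
    let s := rgb_results.foldl
      (fun (s : Int × Int × Int) rgb => (max s.1 rgb.1, max s.2.1 rgb.2.1, max s.2.2 rgb.2.2))
      (h.1, h.2.1, h.2.2)
    [s.1, s.2.1, s.2.2]

-- ===== PORT B =====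
-- max(rgb[i] for rgb in rgb_results): fold of max over the i-th column, seeded by its head
def pvColMax (vals : List Int) : Int :=
  match vals with
  | [] => 0  -- unreachable: Pre_ excludes [] (Python max() raises ValueError on an empty generator)
  | v :: vs => vs.foldl max v

def max_rgb_for_a_game_alt (rgb_results : List (Int × Int × Int)) : List Int :=
  [pvColMax (rgb_results.map (·.1)),
   pvColMax (rgb_results.map (·.2.1)),
   pvColMax (rgb_results.map (·.2.2))]

-- ===== PRECONDITION & SPEC =====
-- Pre_ excludes only the empty list, on which both Pythons raise (A IndexError, B ValueError).
def Pre_max_rgb_for_a_game (rgb_results : List (Int × Int × Int)) : Prop := rgb_results ≠ []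
instance (rgb_results : List (Int × Int × Int)) : Decidable (Pre_max_rgb_for_a_game rgb_results) := by unfold Pre_max_rgb_for_a_game; infer_instance
def pvWitness_max_rgb_for_a_game : (List (Int × Int × Int)) := [(1, 2, 3), (4, 0, 2)]

def Spec_max_rgb_for_a_game (rgb_results : List (Int × Int × Int)) (out : List Int) : Prop := out = max_rgb_for_a_game_alt rgb_results
instance (rgb_results : List (Int × Int × Int)) (out : List Int) : Decidable (Spec_max_rgb_for_a_game rgb_results out) := by unfold Spec_max_rgb_for_a_game; infer_instance

-- ===== CLAIM (what is proved, stated in full; the proofs are below) =====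
def Claim_equal_max_rgb_for_a_game : Prop := ∀ (rgb_results : List (Int × Int × Int)), Dom_max_rgb_for_a_game rgb_results → Pre_max_rgb_for_a_game rgb_results → Spec_max_rgb_for_a_game rgb_results (max_rgb_for_a_game rgb_results)

-- ===== LEMMAS AND PROOFS =====
-- the interleaved triple fold equals the three component folds
theorem pv_fold_split (xs : List (Int × Int × Int)) (a b c : Int) :
    xs.foldl (fun (s : Int × Int × Int) rgb => (max s.1 rgb.1, max s.2.1 rgb.2.1, max s.2.2 rgb.2.2)) (a, b, c)
      = (xs.foldl (fun m rgb => max m rgb.1) a,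
         xs.foldl (fun m rgb => max m rgb.2.1) b,
         xs.foldl (fun m rgb => max m rgb.2.2) c) := by
  induction xs generalizing a b c with
  | nil => rfl
  | cons h t ih => simp [List.foldl, ih]

-- a component fold over the rows, seeded from the (duplicated) head, is pvColMax of the mapped column
theorem pv_fold_col (f : Int × Int × Int → Int) (h : Int × Int × Int) (t : List (Int × Int × Int)) :
    (h :: t).foldl (fun m rgb => max m (f rgb)) (f h) = pvColMax ((h :: t).map f) := by
  simp [pvColMax, List.foldl, List.foldl_map]

-- ===== VERDICT (by name: the statement is the Claim_ definition above) =====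
theorem max_rgb_for_a_game_spec : Claim_equal_max_rgb_for_a_game := by
  intro rgb_results _ hpre
  unfold Spec_max_rgb_for_a_game max_rgb_for_a_game max_rgb_for_a_game_alt
  match rgb_results with
  | [] => exact absurd rfl hpre
  | h :: t =>
    have hs := pv_fold_split (h :: t) h.1 h.2.1 h.2.2
    have h1 := pv_fold_col (·.1) h t
    have h2 := pv_fold_col (·.2.1) h t
    have h3 := pv_fold_col (·.2.2) h t
    simp only [List.foldl] at hs h1 h2 h3 ⊢
    rw [hs, h1, h2, h3]
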